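-- pv_equiv track=rewrite | github.com/kausik-l/RLChatbot | utilities/high_level_cornell.py | dialogues_to_pairs
-- ===== SOURCE A (Python) =====
-- def dialogues_to_pairs(dialogues,max_tokens=None):
--     out = []
--     for dialogue in dialogues:
--         prev_phrase = None
--         for phrase in dialogue:
--             if prev_phrase is not None:
--                 if max_tokens is None or (len(prev_phrase) <= max_tokens and len(phrase) <= max_tokens):
--                     out.append((prev_phrase,phrase))
--             prev_phrase = phrase
--     return out
-- ===== SOURCE B (Python) =====
-- def dialogues_to_pairs(dialogues, max_tokens=None):
--     if max_tokens is None: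
--         ok = lambda a, b: True
--     else:
--         ok = lambda a, b: len(a) <= max_tokens and len(b) <= max_tokens
--     return [pair
--             for dialogue in dialogues
--             for pair in zip(dialogue, dialogue[1:])
--             if ok(*pair)]
-- ===== Notes on version B (the rewrite author's own statement) =====
-- stated objective: idiomatic
-- what changed: Replaces the mutable prev_phrase state machine with a flat comprehension over zip(dialogue, dialogue[1:]) adjacent pairs, filtered by a predicate chosen once up front.
import Mathlib
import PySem

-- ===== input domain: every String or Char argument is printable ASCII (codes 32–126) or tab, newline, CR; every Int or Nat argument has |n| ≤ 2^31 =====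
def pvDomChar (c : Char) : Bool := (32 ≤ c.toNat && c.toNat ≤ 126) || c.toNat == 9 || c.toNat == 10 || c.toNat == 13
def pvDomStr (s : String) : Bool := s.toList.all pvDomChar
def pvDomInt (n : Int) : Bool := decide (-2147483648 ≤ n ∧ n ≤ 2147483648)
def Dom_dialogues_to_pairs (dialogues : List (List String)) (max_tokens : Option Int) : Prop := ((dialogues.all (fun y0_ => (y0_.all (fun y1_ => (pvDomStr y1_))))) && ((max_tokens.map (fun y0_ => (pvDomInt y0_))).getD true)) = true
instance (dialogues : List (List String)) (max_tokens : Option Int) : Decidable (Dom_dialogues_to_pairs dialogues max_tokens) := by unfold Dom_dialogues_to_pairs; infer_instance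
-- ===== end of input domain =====

-- B replaces A's mutable prev_phrase state machine with a flat filtered traversal of
-- zip(dialogue, dialogue[1:]) adjacent pairs; same return value, no side effects in either.

-- ===== PORT A =====
-- inner loop over one dialogue: state is (out, prev_phrase)
def pvInnerA (max_tokens : Option Int) (dialogue : List String) (st : List (String × String) × Option String) : List (String × String) × Option String :=
  dialogue.foldl (fun st phrase =>
    match st with
    | (out, prev) =>
      let out :=
        match prev with
        | none => out
        | some prev_phrase =>
          if (match max_tokens with
              | none => true
              | some m => decide (PySem.Str.len prev_phrase ≤ m) && decide (PySem.Str.len phrase ≤ m)) then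
            out ++ [(prev_phrase, phrase)]
          else out
      (out, some phrase)) st

def dialogues_to_pairs (dialogues : List (List String)) (max_tokens : Option Int) : List (String × String) :=
  (dialogues.foldl (fun out dialogue => (pvInnerA max_tokens dialogue (out, none)).1) [])

-- ===== PORT B =====
def pvOkB (max_tokens : Option Int) (a b : String) : Bool :=
  match max_tokens with
  | none => true
  | some m => decide (PySem.Str.len a ≤ m) && decide (PySem.Str.len b ≤ m)

def dialogues_to_pairs_alt (dialogues : List (List String)) (max_tokens : Option Int) : List (String × String) :=
  dialogues.flatMap (fun dialogue =>
    (dialogue.zip (PySem.List.slice dialogue (some 1) none)).filter (fun p => pvOkB max_tokens p.1 p.2))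

-- ===== PRECONDITION & SPEC =====
def Spec_dialogues_to_pairs (dialogues : List (List String)) (max_tokens : Option Int) (out : List (String × String)) : Prop := out = dialogues_to_pairs_alt dialogues max_tokens
instance (dialogues : List (List String)) (max_tokens : Option Int) (out : List (String × String)) : Decidable (Spec_dialogues_to_pairs dialogues max_tokens out) := by unfold Spec_dialogues_to_pairs; infer_instance

-- ===== CLAIM (what is proved, stated in full; the proofs are below) =====
def Claim_equal_dialogues_to_pairs : Prop := ∀ (dialogues : List (List String)) (max_tokens : Option Int), Dom_dialogues_to_pairs dialogues max_tokens → Spec_dialogues_to_pairs dialogues max_tokens (dialogues_to_pairs dialogues max_tokens)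

-- ===== LEMMAS AND PROOFS =====

-- A's inner loop, started with prev = some q, emits exactly the filtered adjacent pairs of q :: d.
theorem pvInnerA_some (mt : Option Int) (d : List String) (q : String) (out : List (String × String)) :
    pvInnerA mt d (out, some q) =
      (out ++ (((q :: d).zip d).filter (fun p => pvOkB mt p.1 p.2)), some ((d.reverse.head?).getD q)) := by
  induction d generalizing q out with
  | nil => simp [pvInnerA, List.foldl]
  | cons p rest ih =>
    simp only [pvInnerA, List.foldl] at ih ⊢
    rw [ih]
    simp only [Prod.mk.injEq]
    refine ⟨?_, ?_⟩
    · rw [show ((q :: p :: rest).zip (p :: rest)) = (q, p) :: ((p :: rest).zip rest) from rfl,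
        List.filter_cons]
      show (if pvOkB mt q p = true then out ++ [(q, p)] else out) ++ _ = _
      by_cases h : pvOkB mt q p = true
      · simp [h, List.append_assoc]
      · simp [h]
    · cases hr : rest.reverse <;> simp [hr]

theorem pvInnerA_none (mt : Option Int) (d : List String) (out : List (String × String)) :
    (pvInnerA mt d (out, none)).1 =
      out ++ ((d.zip d.tail).filter (fun p => pvOkB mt p.1 p.2)) := by
  cases d with
  | nil => simp [pvInnerA]
  | cons p rest =>
    simp only [pvInnerA, List.foldl]
    have h := pvInnerA_some mt rest p out
    simp only [pvInnerA] at h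
    rw [h]
    rfl

-- outer loop: the foldl over dialogues accumulates the per-dialogue filtered pairs
theorem pvOuter (mt : Option Int) (ds : List (List String)) (out : List (String × String)) :
    ds.foldl (fun out dialogue => (pvInnerA mt dialogue (out, none)).1) out =
      out ++ ds.flatMap (fun d => (d.zip d.tail).filter (fun p => pvOkB mt p.1 p.2)) := by
  induction ds generalizing out with
  | nil => simp
  | cons d rest ih =>
    simp only [List.foldl, List.flatMap_cons]
    rw [ih, pvInnerA_none, List.append_assoc]

-- ===== VERDICT (by name: the statement is the Claim_ definition above) =====
theorem dialogues_to_pairs_spec : Claim_equal_dialogues_to_pairs := by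
  intro dialogues max_tokens _
  unfold Spec_dialogues_to_pairs dialogues_to_pairs dialogues_to_pairs_alt
  rw [pvOuter]
  simp [PySem.List.slice_from_one]
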